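-- pv_equiv track=rewrite | github.com/Armatyrina-42/Fominov-pavel- | 8.4.1.py | find_min_max_rows
-- ===== SOURCE A (Python) =====
-- def find_min_max_rows(matrix):
--   """
--   Args:
--     matrix: Прямоугольная матрица целых чисел.
--   Returns:
--     Кортеж (строка с наибольшей суммой, строка с наименьшей суммой,
--              сумма элементов наибольшей строки, сумма элементов наименьшей строки).
--   """
--   rows = len(matrix)
--   cols = len(matrix[0])
--   max_row_index = 0
--   min_row_index = 0
--   max_sum = sum(matrix[0])
--   min_sum = sum(matrix[0])
--   for i in range(1, rows):
--     current_sum = sum(matrix[i])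
--     if current_sum > max_sum:
--       max_sum = current_sum
--       max_row_index = i
--     if current_sum < min_sum:
--       min_sum = current_sum
--       min_row_index = i
--   return matrix[max_row_index], matrix[min_row_index], max_sum, min_sum
-- ===== SOURCE B (Python) =====
-- def find_min_max_rows(matrix):
--   sums = [sum(row) for row in matrix]
--   indices = range(len(sums))
--   max_i = max(indices, key=sums.__getitem__)
--   min_i = min(indices, key=sums.__getitem__)
--   return matrix[max_i], matrix[min_i], sums[max_i], sums[min_i]
-- ===== Notes on version B (the rewrite author's own statement) =====
-- stated objective: idiomatic
-- what changed: B builds a table of row sums and finds the extremal row indices with Python's builtin max/min over range (key = table lookup), instead of A's single hand-written loop maintaining four running variables; builtin max/min keep the first extremum, matching A's strict comparisons.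
import Mathlib
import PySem

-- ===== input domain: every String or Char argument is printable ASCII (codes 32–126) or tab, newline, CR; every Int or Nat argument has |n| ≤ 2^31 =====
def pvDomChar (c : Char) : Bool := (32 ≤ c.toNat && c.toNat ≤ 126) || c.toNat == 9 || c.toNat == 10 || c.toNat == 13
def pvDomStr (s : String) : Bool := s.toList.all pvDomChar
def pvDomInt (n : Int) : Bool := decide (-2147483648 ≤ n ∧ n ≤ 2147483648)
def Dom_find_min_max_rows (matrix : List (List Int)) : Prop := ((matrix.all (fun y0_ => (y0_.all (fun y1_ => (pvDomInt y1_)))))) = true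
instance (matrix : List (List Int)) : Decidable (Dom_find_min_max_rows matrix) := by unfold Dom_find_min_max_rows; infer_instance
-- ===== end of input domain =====

-- B replaces A's single running-extrema loop by a row-sum table plus Python's builtin
-- max/min over range(len(sums)) with a table-lookup key (idiomatic; first-occurrence ties preserved).


-- ===== PORT A =====
-- Literal port of A: every index (0 and each loop index i) is in range under Pre_ (matrix ≠ []),
-- so the sanctioned total form pyGetD is used for matrix[…]; the loop is a foldl over
-- range(1, rows) carrying (max_row_index, min_row_index, max_sum, min_sum).
def find_min_max_rows (matrix : List (List Int)) : List Int × List Int × Int × Int :=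
  let rows : Int := matrix.length
  let s0 : Int := (PySem.List.pyGetD matrix 0 []).sum
  let st :=
    (PySem.List.pyRange 1 rows 1).foldl
      (fun (st : Int × Int × Int × Int) i =>
        let current_sum : Int := (PySem.List.pyGetD matrix i []).sum
        let st1 := if current_sum > st.2.2.1 then (i, st.2.1, current_sum, st.2.2.2) else st
        if current_sum < st1.2.2.2 then (st1.1, i, st1.2.2.1, current_sum) else st1)
      (0, 0, s0, s0)
  (PySem.List.pyGetD matrix st.1 [], PySem.List.pyGetD matrix st.2.1 [], st.2.2.1, st.2.2.2)

-- ===== PORT B =====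
-- Literal port of Source B: sums table, then max/min over range with key sums.__getitem__
-- (PySem.List.max?/min? keep the FIRST extremal element, like Python's max/min).
-- The none branches are unreachable under Pre_ (there Python's max/min raise ValueError).
def find_min_max_rows_alt (matrix : List (List Int)) : List Int × List Int × Int × Int :=
  let sums : List Int := matrix.map List.sum
  let indices := PySem.List.pyRange 0 (sums.length : Int) 1
  let key : Int → Int := fun i => PySem.List.pyGetD sums i 0
  match PySem.List.max? indices key, PySem.List.min? indices key with
  | some max_i, some min_i =>
      (PySem.List.pyGetD matrix max_i [], PySem.List.pyGetD matrix min_i [],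
       PySem.List.pyGetD sums max_i 0, PySem.List.pyGetD sums min_i 0)
  | _, _ => ([], [], 0, 0)

-- ===== PRECONDITION & SPEC =====
-- Pre_ excludes exactly the empty matrix, on which A raises IndexError (matrix[0]).
def Pre_find_min_max_rows (matrix : List (List Int)) : Prop := matrix ≠ []
instance (matrix : List (List Int)) : Decidable (Pre_find_min_max_rows matrix) := by unfold Pre_find_min_max_rows; infer_instance
def pvWitness_find_min_max_rows : List (List Int) := [[1, 2], [3]]

def Spec_find_min_max_rows (matrix : List (List Int)) (out : List Int × List Int × Int × Int) : Prop := out = find_min_max_rows_alt matrix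
instance (matrix : List (List Int)) (out : List Int × List Int × Int × Int) : Decidable (Spec_find_min_max_rows matrix out) := by unfold Spec_find_min_max_rows; infer_instance

-- ===== CLAIM (what is proved, stated in full; the proofs are below) =====
def Claim_equal_find_min_max_rows : Prop := ∀ (matrix : List (List Int)), Dom_find_min_max_rows matrix → Pre_find_min_max_rows matrix → Spec_find_min_max_rows matrix (find_min_max_rows matrix)

-- ===== LEMMAS AND PROOFS =====

-- A's loop body, abstracted over the per-index key (in A, key i = sum(matrix[i])).
def pvStepA (key : Int → Int) (st : Int × Int × Int × Int) (i : Int) : Int × Int × Int × Int :=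
  let current_sum := key i
  let st1 := if current_sum > st.2.2.1 then (i, st.2.1, current_sum, st.2.2.2) else st
  if current_sum < st1.2.2.2 then (st1.1, i, st1.2.2.1, current_sum) else st1

-- The fold steps of Python's max/min with a key (PySem.List.max?/min?), named so the
-- invariant lemma and the ports share one term.
def pvMaxStep (key : Int → Int) (acc : Option Int) (x : Int) : Option Int :=
  match acc with
  | none => some x
  | some m => if key m < key x then some x else some m

def pvMinStep (key : Int → Int) (acc : Option Int) (x : Int) : Option Int :=
  match acc with
  | none => some x
  | some m => if key x < key m then some x else some m

lemma pv_max?_cons (key : Int → Int) (l : List Int) : ∀ (a : Int),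
    PySem.List.max? (a :: l) key = l.foldl (pvMaxStep key) (some a) := by
  induction l with
  | nil => intro a; simp [PySem.List.max?, List.foldl]
  | cons x t ih =>
    intro a
    have h1 : PySem.List.max? (a :: x :: t) key
        = PySem.List.max? ((if key a < key x then x else a) :: t) key := by
      by_cases h : key a < key x <;> simp [PySem.List.max?, List.foldl_cons, h]
    rw [h1]
    by_cases h : key a < key x
    · rw [if_pos h, ih x]
      simp [List.foldl_cons, pvMaxStep, h]
    · rw [if_neg h, ih a]
      simp [List.foldl_cons, pvMaxStep, h]

lemma pv_min?_cons (key : Int → Int) (l : List Int) : ∀ (a : Int),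
    PySem.List.min? (a :: l) key = l.foldl (pvMinStep key) (some a) := by
  induction l with
  | nil => intro a; simp [PySem.List.min?, List.foldl]
  | cons x t ih =>
    intro a
    have h1 : PySem.List.min? (a :: x :: t) key
        = PySem.List.min? ((if key x < key a then x else a) :: t) key := by
      by_cases h : key x < key a <;> simp [PySem.List.min?, List.foldl_cons, h]
    rw [h1]
    by_cases h : key x < key a
    · rw [if_pos h, ih x]
      simp [List.foldl_cons, pvMinStep, h]
    · rw [if_neg h, ih a]
      simp [List.foldl_cons, pvMinStep, h]

-- Invariant: A's combined fold computes, in its four components, the running first-argmax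
-- index, the running first-argmin index, and their key values — exactly the states of the
-- max?/min? folds once they have seen a first element.
lemma pv_fold_rel (key : Int → Int) (l : List Int) :
    ∀ (mi ni ms ns : Int), ms = key mi → ns = key ni →
      l.foldl (pvMaxStep key) (some mi) = some (l.foldl (pvStepA key) (mi, ni, ms, ns)).1
      ∧ l.foldl (pvMinStep key) (some ni) = some (l.foldl (pvStepA key) (mi, ni, ms, ns)).2.1
      ∧ (l.foldl (pvStepA key) (mi, ni, ms, ns)).2.2.1
          = key (l.foldl (pvStepA key) (mi, ni, ms, ns)).1
      ∧ (l.foldl (pvStepA key) (mi, ni, ms, ns)).2.2.2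
          = key (l.foldl (pvStepA key) (mi, ni, ms, ns)).2.1 := by
  induction l with
  | nil => intro mi ni ms ns hm hn; simp [List.foldl, hm, hn]
  | cons x t ih =>
    intro mi ni ms ns hm hn
    subst hm hn
    simp only [List.foldl_cons]
    by_cases h1 : key mi < key x
    · by_cases h2 : key x < key ni
      · have H := ih x x (key x) (key x) rfl rfl
        simp only [pvStepA, pvMaxStep, pvMinStep, gt_iff_lt, h1, h2, ite_true] at H ⊢
        exact H
      · have H := ih x ni (key x) (key ni) rfl rfl
        simp only [pvStepA, pvMaxStep, pvMinStep, gt_iff_lt, h1, h2, ite_true, ite_false] at H ⊢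
        exact H
    · by_cases h2 : key x < key ni
      · have H := ih mi x (key mi) (key x) rfl rfl
        simp only [pvStepA, pvMaxStep, pvMinStep, gt_iff_lt, h1, h2, ite_true, ite_false] at H ⊢
        exact H
      · have H := ih mi ni (key mi) (key ni) rfl rfl
        simp only [pvStepA, pvMaxStep, pvMinStep, gt_iff_lt, h1, h2, ite_false] at H ⊢
        exact H

-- A's loop body IS pvStepA with key i = sum(matrix[i]).
lemma pv_stepA_eq (matrix : List (List Int)) :
    (fun (st : Int × Int × Int × Int) (i : Int) =>
        let current_sum : Int := (PySem.List.pyGetD matrix i []).sum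
        let st1 := if current_sum > st.2.2.1 then (i, st.2.1, current_sum, st.2.2.2) else st
        if current_sum < st1.2.2.2 then (st1.1, i, st1.2.2.1, current_sum) else st1)
      = pvStepA (fun i => (PySem.List.pyGetD matrix i []).sum) := by
  funext st i
  simp only [pvStepA]

-- ===== VERDICT (by name: the statement is the Claim_ definition above) =====
theorem find_min_max_rows_spec : Claim_equal_find_min_max_rows := by
  intro matrix _ hpre
  unfold Spec_find_min_max_rows
  match matrix, hpre with
  | r0 :: rest, _ =>
    have hkey : (fun i => (PySem.List.pyGetD (r0 :: rest) i []).sum)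
        = fun i => PySem.List.pyGetD ((r0 :: rest).map List.sum) i 0 := by
      funext i
      exact (PySem.List.pyGetD_map List.sum (r0 :: rest) i []).symm
    have h0 : (PySem.List.pyGetD (r0 :: rest) 0 []).sum
        = PySem.List.pyGetD ((r0 :: rest).map List.sum) 0 0 :=
      (PySem.List.pyGetD_map List.sum (r0 :: rest) 0 []).symm
    have hpos : (0 : Int) < ((r0 :: rest).length : Int) := by
      simp only [List.length_cons]; omega
    have hrange : PySem.List.pyRange 0 ((r0 :: rest).length : Int) 1
        = 0 :: PySem.List.pyRange 1 ((r0 :: rest).length : Int) 1 :=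
      PySem.List.pyRange_one_cons hpos
    have H := pv_fold_rel (fun i => PySem.List.pyGetD ((r0 :: rest).map List.sum) i 0)
      (PySem.List.pyRange 1 ((r0 :: rest).length : Int) 1)
      0 0 _ _ rfl rfl
    unfold find_min_max_rows find_min_max_rows_alt
    simp only [pv_stepA_eq, hkey, h0, List.length_map, hrange, pv_max?_cons, pv_min?_cons,
      H.1, H.2.1, H.2.2.1, H.2.2.2]
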